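-- pv_equiv track=rewrite | github.com/igorpie1705/wdi-zadania | wdi-kolokwia/22_23_A2.py | nalezy
-- ===== SOURCE A (Python) =====
-- def nalezy(n):
--     a, b = 1, 2
--     if n == a or n == b:
--         return True
--     for i in range(n + 1):
--         a, b = b, a + b - 1
--         if b == n:
--             return True
--     return False
-- ===== SOURCE B (Python) =====
-- def nalezy(n):
--     m = n - 1
--     if m < 0:
--         return False
--     x, y = 0, 1
--     while x < m:
--         x, y = y, x + y
--     return x == m
-- ===== Notes on version B (the rewrite author's own statement) =====
-- stated objective: faster
-- what changed: A scans a shifted sequence (a,b)->(b,a+b-1) for a fixed n+1 iterations looking for n; B observes that A accepts n exactly when n-1 is a Fibonacci number and iterates the plain Fibonacci pair (0,1) only until it reaches n-1, testing equality once, so it takes O(log n) steps instead of n+1.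
import Mathlib
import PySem

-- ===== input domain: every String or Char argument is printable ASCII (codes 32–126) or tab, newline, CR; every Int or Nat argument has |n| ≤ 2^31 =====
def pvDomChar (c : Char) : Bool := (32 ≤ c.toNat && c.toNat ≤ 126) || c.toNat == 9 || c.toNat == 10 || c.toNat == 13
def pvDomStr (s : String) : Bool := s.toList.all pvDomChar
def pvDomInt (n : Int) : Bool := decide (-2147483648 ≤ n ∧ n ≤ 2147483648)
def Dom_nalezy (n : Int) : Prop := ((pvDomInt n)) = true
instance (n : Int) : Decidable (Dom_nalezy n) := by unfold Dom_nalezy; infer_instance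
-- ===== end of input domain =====

-- B replaces A's fixed-length scan of the shifted sequence (a,b)->(b,a+b-1) by the
-- observation that A accepts n iff n-1 is a Fibonacci number: B walks the plain
-- Fibonacci pair (0,1) until it reaches n-1, so O(log n) steps instead of n+1 (faster).


-- ===== PORT A =====
-- the 'for i in range(n+1)' loop: k remaining iterations (range(n+1) has (n+1).toNat
-- elements, i itself is unused); each step does a, b = b, a + b - 1 and tests b == n
def nalezyLoop (n : Int) : Nat → Int → Int → Bool
  | 0, _, _ => false
  | k + 1, a, b =>
    let b' := a + b - 1
    if b' = n then true else nalezyLoop n k b b'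

def nalezy (n : Int) : Bool :=
  -- a, b = 1, 2; if n == a or n == b: return True
  if n = 1 ∨ n = 2 then true
  else nalezyLoop n (n + 1).toNat 1 2

-- ===== PORT B =====
-- the 'while x < m' loop of Source B; x, y kept as Nats (the branch guarantees m ≥ 0 and
-- x, y stay ≥ 0); the two proof arguments are loop invariants (x ≤ y, 1 ≤ y) needed
-- only for termination, they do not alter the computation
def nalezyAltLoop (m x y : Nat) (hxy : x ≤ y) (hy : 1 ≤ y) : Bool :=
  if x < m then nalezyAltLoop m y (x + y) (by omega) (by omega)
  else x == m
termination_by (m - x) * 2 + (if y ≤ x then 1 else 0)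
decreasing_by split_ifs <;> omega

def nalezy_alt (n : Int) : Bool :=
  let m := n - 1
  if m < 0 then false
  else nalezyAltLoop m.toNat 0 1 (by omega) (by omega)

-- ===== PRECONDITION & SPEC =====
def Spec_nalezy (n : Int) (out : Bool) : Prop := out = nalezy_alt n
instance (n : Int) (out : Bool) : Decidable (Spec_nalezy n out) := by unfold Spec_nalezy; infer_instance

-- ===== CLAIM (what is proved, stated in full; the proofs are below) =====
def Claim_equal_nalezy : Prop := ∀ (n : Int), Dom_nalezy n → Spec_nalezy n (nalezy n)

-- ===== LEMMAS AND PROOFS =====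

-- every index is at most its Fibonacci number plus one
theorem le_fib_add_one : ∀ k : Nat, k ≤ Nat.fib k + 1 := by
  intro k
  induction k using Nat.strong_induction_on with
  | _ k ih =>
    match k with
    | 0 => simp
    | 1 => simp
    | 2 => simp [Nat.fib]
    | (k + 3) =>
      have h1 := ih (k + 2) (by omega)
      have h2 : 0 < Nat.fib (k + 1) := Nat.fib_pos.mpr (by omega)
      have h3 := Nat.fib_add_two (n := k + 1)
      rw [show k + 1 + 2 = k + 3 from rfl, show k + 1 + 1 = k + 2 from rfl] at h3
      omega

-- one manual unfolding lemma for the well-founded loop (used instead of repeated rw)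
theorem altLoop_eq (m x y : Nat) (hxy : x ≤ y) (hy : 1 ≤ y) :
    nalezyAltLoop m x y hxy hy =
      if x < m then
        nalezyAltLoop m y (x + y) (Nat.le_add_left y x) (Nat.le_trans hy (Nat.le_add_left y x))
      else (x == m) := by
  rw [nalezyAltLoop]

-- B's loop, started on a consecutive Fibonacci pair none of whose predecessors hit m,
-- decides whether m is a Fibonacci number (μ is an induction bound on the loop measure)
theorem altLoop_iff (m : Nat) : ∀ μ i x y (hxy : x ≤ y) (hy : 1 ≤ y),
    (m - x) * 2 + (if y ≤ x then 1 else 0) ≤ μ →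
    x = Nat.fib i → y = Nat.fib (i + 1) → (∀ j, j < i → Nat.fib j ≠ m) →
    (nalezyAltLoop m x y hxy hy = true ↔ ∃ k, Nat.fib k = m) := by
  intro μ
  induction μ with
  | zero =>
    intro i x y hxy hy hμ hx hyf hprev
    have hge : ¬ x < m := by split_ifs at hμ <;> omega
    rw [altLoop_eq, if_neg hge]
    constructor
    · intro h
      simp only [beq_iff_eq] at h
      exact ⟨i, by omega⟩
    · rintro ⟨k, hk⟩
      have hki : i ≤ k := by
        by_contra hc
        exact hprev k (by omega) hk
      have := Nat.fib_mono hki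
      simp only [beq_iff_eq]
      omega
  | succ μ ih =>
    intro i x y hxy hy hμ hx hyf hprev
    by_cases hlt : x < m
    · rw [altLoop_eq, if_pos hlt]
      refine ih (i + 1) y (x + y) (by omega) (by omega) ?_ hyf
        (by rw [Nat.fib_add_two]; omega) ?_
      · split_ifs at hμ ⊢ <;> omega
      · intro j hj
        rcases Nat.lt_succ_iff_lt_or_eq.mp hj with h | h
        · exact hprev j h
        · subst h; omega
    · rw [altLoop_eq, if_neg hlt]
      constructor
      · intro h
        simp only [beq_iff_eq] at h
        exact ⟨i, by omega⟩
      · rintro ⟨k, hk⟩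
        have hki : i ≤ k := by
          by_contra hc
          exact hprev k (by omega) hk
        have := Nat.fib_mono hki
        simp only [beq_iff_eq]
        omega

-- A's loop, started on (fib i + 1, fib (i+1) + 1), finds n iff one of the next k
-- shifted Fibonacci values equals n
theorem aLoop_iff (n : Int) : ∀ k i (a b : Int),
    a = (Nat.fib i : Int) + 1 → b = (Nat.fib (i + 1) : Int) + 1 →
    (nalezyLoop n k a b = true ↔ ∃ j, 1 ≤ j ∧ j ≤ k ∧ ((Nat.fib (i + 1 + j) : Int) + 1 = n)) := by
  intro k
  induction k with
  | zero => intro i a b _ _; simp [nalezyLoop]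
  | succ k ih =>
    intro i a b ha hb
    have hb' : a + b - 1 = (Nat.fib (i + 2) : Int) + 1 := by
      rw [ha, hb, Nat.fib_add_two]; push_cast; ring
    rw [nalezyLoop]
    by_cases h : a + b - 1 = n
    · simp only [if_pos h]
      constructor
      · intro _
        refine ⟨1, by omega, by omega, ?_⟩
        rw [show i + 1 + 1 = i + 2 from rfl, ← hb', h]
      · intro _; trivial
    · simp only [if_neg h]
      rw [ih (i + 1) b (a + b - 1) hb hb']
      constructor
      · rintro ⟨j, h1, h2, h3⟩
        refine ⟨j + 1, by omega, by omega, ?_⟩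
        rw [show i + 1 + (j + 1) = i + 1 + 1 + j by omega]
        exact h3
      · rintro ⟨j, h1, h2, h3⟩
        rcases Nat.lt_or_ge j 2 with hj | hj
        · exfalso
          have hj1 : j = 1 := by omega
          subst hj1
          rw [show i + 1 + 1 = i + 2 from rfl] at h3
          exact h (by rw [hb']; exact h3)
        · refine ⟨j - 1, by omega, by omega, ?_⟩
          rw [show i + 1 + 1 + (j - 1) = i + 1 + j by omega]
          exact h3

-- characterisation of A: true iff n ≥ 1 and n - 1 is a Fibonacci number
theorem nalezy_iff_fib (n : Int) :
    nalezy n = true ↔ (1 ≤ n ∧ ∃ k, (Nat.fib k : Int) = n - 1) := by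
  unfold nalezy
  by_cases h12 : n = 1 ∨ n = 2
  · simp only [if_pos h12, true_iff]
    rcases h12 with h | h <;> subst h
    · exact ⟨by omega, 0, by simp⟩
    · exact ⟨by omega, 1, by simp⟩
  · simp only [if_neg h12]
    rw [aLoop_iff n ((n + 1).toNat) 0 1 2 (by simp) (by simp)]
    constructor
    · rintro ⟨j, h1, h2, h3⟩
      rw [show 0 + 1 + j = 1 + j by omega] at h3
      have : (0 : Int) ≤ Nat.fib (1 + j) := Int.natCast_nonneg _
      exact ⟨by omega, 1 + j, by omega⟩
    · rintro ⟨hn, k, hk⟩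
      -- n ∉ {1, 2} and n ≥ 1 force n ≥ 3, so n - 1 ≥ 2, so 2 ≤ k and k ≤ n
      have hn3 : 3 ≤ n := by omega
      have hfib2 : (2 : Int) ≤ Nat.fib k := by omega
      have hk2 : 2 ≤ k := by
        by_contra hc
        rcases (by omega : k = 0 ∨ k = 1) with h | h <;> subst h
        · have h0 : Nat.fib 0 = 0 := rfl
          omega
        · have h1 : Nat.fib 1 = 1 := rfl
          omega
      have hlb := le_fib_add_one k
      have hkn : (k : Int) ≤ n := by
        have : ((Nat.fib k : Nat) : Int) = n - 1 := hk
        omega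
      refine ⟨k - 1, by omega, by omega, ?_⟩
      rw [show 0 + 1 + (k - 1) = k by omega]
      omega

-- characterisation of B: same
theorem nalezy_alt_iff_fib (n : Int) :
    nalezy_alt n = true ↔ (1 ≤ n ∧ ∃ k, (Nat.fib k : Int) = n - 1) := by
  unfold nalezy_alt
  by_cases h : n - 1 < 0
  · rw [if_pos h]
    constructor
    · intro hc; exact Bool.noConfusion hc
    · rintro ⟨h1, _⟩; omega
  · simp only [if_neg h]
    rw [altLoop_iff (n - 1).toNat ((n - 1).toNat * 2 + 1) 0 0 1 (by omega) (by omega)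
      (by split_ifs <;> omega) (by simp) (by simp) (by intro j hj; omega)]
    have hcast : ∀ k : Nat, ((Nat.fib k : Int) = n - 1 ↔ Nat.fib k = (n - 1).toNat) := by
      intro k; omega
    constructor
    · rintro ⟨k, hk⟩; exact ⟨by omega, k, (hcast k).mpr hk⟩
    · rintro ⟨_, k, hk⟩; exact ⟨k, (hcast k).mp hk⟩

-- ===== VERDICT (by name: the statement is the Claim_ definition above) =====
theorem nalezy_spec : Claim_equal_nalezy := by
  intro n _
  unfold Spec_nalezy
  have ha := nalezy_iff_fib n
  have hb := nalezy_alt_iff_fib n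
  cases hA : nalezy n <;> cases hB : nalezy_alt n <;> simp_all
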